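-- pv_equiv track=rewrite | github.com/BoddiReddyShivani/AI | Number Classification.py | classify_number
-- ===== SOURCE A (Python) =====
-- import math
--
-- def classify_number(num):
--     """
--     Classify a given number as Prime, Composite, or Neither Prime nor Composite.
--
--     Args:
--         num: A value to be classified
--
--     Returns:
--         A string classification: "Prime", "Composite", or "Neither Prime nor Composite"
--
--     Raises:
--         TypeError: If num is not an integer
--     """
--     # Validate input type
--     if not isinstance(num, int) or isinstance(num, bool):
--         raise TypeError(f"Input must be an integer, got {type(num).__name__}")
--
--     # Handle numbers less than or equal to 1
--     if num <= 1:
--         return "Neither Prime nor Composite"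
--
--     # Handle number 2 (only even prime)
--     if num == 2:
--         return "Prime"
--
--     # Handle even numbers (all even numbers > 2 are composite)
--     if num % 2 == 0:
--         return "Composite"
--
--     # Optimize: Check divisibility only up to sqrt(num)
--     sqrt_num = int(math.sqrt(num))
--
--     # Check odd divisors from 3 to sqrt(num)
--     for i in range(3, sqrt_num + 1, 2):
--         if num % i == 0:
--             return "Composite"
--
--     # If no divisors found, it's prime
--     return "Prime"
-- ===== SOURCE B (Python) =====
-- import math
--
-- def classify_number(num):
--     if not isinstance(num, int) or isinstance(num, bool):
--         raise TypeError(f"Input must be an integer, got {type(num).__name__}")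
--     if num <= 1:
--         return "Neither Prime nor Composite"
--     # Stage 1: sieve of Eratosthenes up to isqrt(num), collecting the primes.
--     s = math.isqrt(num)
--     is_comp = [False] * (s + 1)
--     primes = []
--     for p in range(2, s + 1):
--         if not is_comp[p]:
--             primes.append(p)
--             for m in range(p * p, s + 1, p):
--                 is_comp[m] = True
--     # Stage 2: num is composite iff some prime up to its square root divides it.
--     if any(num % p == 0 for p in primes):
--         return "Composite"
--     return "Prime"
-- ===== Notes on version B (the rewrite author's own statement) =====
-- stated objective: alternative
-- what changed: Replaces A's direct trial division (2/even special cases plus an odd-step loop of candidate divisors up to sqrt(num)) with a sieve of Eratosthenes up to isqrt(num) that collects the primes into a list, followed by a divisibility test of num against those sieved primes only.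
import Mathlib
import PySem

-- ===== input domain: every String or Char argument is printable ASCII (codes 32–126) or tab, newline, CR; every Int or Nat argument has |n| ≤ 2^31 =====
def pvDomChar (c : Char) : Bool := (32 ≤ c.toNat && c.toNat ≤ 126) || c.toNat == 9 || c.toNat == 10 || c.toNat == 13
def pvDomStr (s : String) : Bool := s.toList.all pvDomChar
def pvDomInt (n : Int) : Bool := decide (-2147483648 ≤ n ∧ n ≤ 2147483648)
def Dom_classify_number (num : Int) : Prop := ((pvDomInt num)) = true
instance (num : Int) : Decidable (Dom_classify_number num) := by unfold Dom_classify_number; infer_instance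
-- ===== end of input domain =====

-- B replaces A's direct trial division (2/even special cases + odd-step sqrt-bounded loop) by a
-- sieve of Eratosthenes up to isqrt(num) followed by a divisibility test against the sieved primes only.

-- ===== PORT A =====
-- int(math.sqrt(num)) equals the integer square root on the stated domain 0 ≤ num ≤ 2^31 (float sqrt is exact there)
def classify_number (num : Int) : String :=
  if num ≤ 1 then "Neither Prime nor Composite"
  else if num = 2 then "Prime"
  else if PySem.Int.mod num 2 = 0 then "Composite"
  else
    let sqrt_num : Int := Int.ofNat (Nat.sqrt num.toNat)
    if (PySem.List.pyRange 3 (sqrt_num + 1) 2).any (fun i => PySem.Int.mod num i == 0)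
    then "Composite" else "Prime"

-- ===== PORT B =====
-- Python's mutable list is_comp is held as an Array Bool (internal state, not a parameter).
-- inner sieve loop 'for m in range(p*p, s+1, p): is_comp[m] = True'; the index m is always
-- nonnegative and < len(is_comp) here, so setIfInBounds is exact for Python's assignment
def sieveMark (comp : Array Bool) (p s : Int) : Array Bool :=
  (PySem.List.pyRange (p * p) (s + 1) p).foldl (fun c m => c.setIfInBounds m.toNat true) comp

-- one iteration of 'for p in range(2, s+1): if not is_comp[p]: primes.append(p); <mark>';
-- the index p is always nonnegative and < len(is_comp), so getD is exact for is_comp[p]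
def sieveStep (s : Int) (st : Array Bool × List Int) (p : Int) : Array Bool × List Int :=
  if st.1.getD p.toNat false = false then (sieveMark st.1 p s, st.2 ++ [p]) else st

-- math.isqrt(num) = Nat.sqrt num.toNat for num ≥ 0
def classify_number_alt (num : Int) : String :=
  if num ≤ 1 then "Neither Prime nor Composite"
  else
    let s : Int := Int.ofNat (Nat.sqrt num.toNat)
    let st := (PySem.List.pyRange 2 (s + 1) 1).foldl (sieveStep s)
                (Array.replicate (s + 1).toNat false, ([] : List Int))
    if st.2.any (fun p => PySem.Int.mod num p == 0) then "Composite" else "Prime"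

-- ===== PRECONDITION & SPEC =====
def Spec_classify_number (num : Int) (out : String) : Prop := out = classify_number_alt num
instance (num : Int) (out : String) : Decidable (Spec_classify_number num out) := by unfold Spec_classify_number; infer_instance

-- ===== CLAIM (what is proved, stated in full; the proofs are below) =====
def Claim_equal_classify_number : Prop := ∀ (num : Int), Dom_classify_number num → Spec_classify_number num (classify_number num)

-- ===== LEMMAS AND PROOFS =====

-- Sieve soundness invariant: the marked array has the right length, and every marked cell k has a
-- nontrivial divisor, i.e. only composites ever get marked.
def SieveInv (s : Int) (comp : Array Bool) : Prop :=
  comp.size = (s + 1).toNat ∧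
  ∀ k : Int, 0 ≤ k → k ≤ s → comp.getD k.toNat false = true →
    ∃ j : Int, 2 ≤ j ∧ j < k ∧ j ∣ k

-- Full loop invariant: sieve soundness plus every collected prime candidate lies in [2, s].
def SieveGood (s : Int) (st : Array Bool × List Int) : Prop :=
  SieveInv s st.1 ∧ ∀ q ∈ st.2, 2 ≤ q ∧ q ≤ s

theorem pv_getD_setD (xs : Array Bool) (m k : Int) (v d : Bool) (hm0 : 0 ≤ m) (hk0 : 0 ≤ k)
    (hmlen : m.toNat < xs.size) :
    (xs.setIfInBounds m.toNat v).getD k.toNat d =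
      if k = m then v else xs.getD k.toNat d := by
  simp only [Array.getD_eq_getD_getElem?, Array.getElem?_setIfInBounds]
  by_cases h : k = m
  · subst h
    simp [hmlen]
  · have hne : m.toNat ≠ k.toNat := by omega
    simp [hne, h]

theorem pv_foldl_set_inv (s p : Int) (hp : 2 ≤ p) :
    ∀ (l : List Int) (comp : Array Bool), (∀ m ∈ l, p < m ∧ m ≤ s ∧ p ∣ m) → SieveInv s comp →
    SieveInv s (l.foldl (fun c m => c.setIfInBounds m.toNat true) comp)
  | [], comp, _, hinv => hinv
  | m :: l, comp, hmem, hinv => by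
    rw [List.foldl_cons]
    obtain ⟨hpm, hms, hdvd⟩ := hmem m (List.mem_cons_self)
    refine pv_foldl_set_inv s p hp l _ (fun x hx => hmem x (List.mem_cons_of_mem _ hx)) ?_
    obtain ⟨hlen, hsound⟩ := hinv
    have hm0 : 0 ≤ m := by omega
    have hmlen : m.toNat < comp.size := by rw [hlen]; omega
    refine ⟨by rw [Array.size_setIfInBounds]; exact hlen, fun k hk0 hks htrue => ?_⟩
    rw [pv_getD_setD comp m k true false hm0 hk0 hmlen] at htrue
    by_cases hkm : k = m
    · exact ⟨p, hp, by omega, hkm ▸ hdvd⟩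
    · rw [if_neg hkm] at htrue
      exact hsound k hk0 hks htrue

theorem pv_mark_inv (s p : Int) (hp : 2 ≤ p) (comp : Array Bool) (hinv : SieveInv s comp) :
    SieveInv s (sieveMark comp p s) := by
  refine pv_foldl_set_inv s p hp _ comp (fun m hm => ?_) hinv
  rw [PySem.List.mem_pyRange_iff_of_pos (by omega : (0:Int) < p)] at hm
  obtain ⟨h1, h2, h3⟩ := hm
  refine ⟨by nlinarith, by omega, ?_⟩
  have : m = (m - p * p) + p * p := by ring
  rw [this]
  exact dvd_add h3 (Dvd.intro p rfl)

theorem pv_step_good (s p : Int) (hp : 2 ≤ p) (hps : p ≤ s) (st : Array Bool × List Int)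
    (hg : SieveGood s st) : SieveGood s (sieveStep s st p) := by
  unfold sieveStep
  split_ifs with h
  · refine ⟨pv_mark_inv s p hp st.1 hg.1, fun q hq => ?_⟩
    rcases List.mem_append.mp hq with h' | h'
    · exact hg.2 q h'
    · rw [List.mem_singleton] at h'; subst h'; exact ⟨hp, hps⟩
  · exact hg

theorem pv_foldl_good (s : Int) :
    ∀ (l : List Int) (st : Array Bool × List Int), (∀ p ∈ l, 2 ≤ p ∧ p ≤ s) → SieveGood s st →
    SieveGood s (l.foldl (sieveStep s) st)
  | [], st, _, hg => hg
  | p :: l, st, hmem, hg => by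
    rw [List.foldl_cons]
    obtain ⟨hp, hps⟩ := hmem p (List.mem_cons_self)
    exact pv_foldl_good s l _ (fun x hx => hmem x (List.mem_cons_of_mem _ hx))
      (pv_step_good s p hp hps st hg)

theorem pv_mem_primes_foldl (s : Int) :
    ∀ (l : List Int) (st : Array Bool × List Int) (q : Int), q ∈ st.2 →
    q ∈ (l.foldl (sieveStep s) st).2
  | [], _, _, hq => hq
  | p :: l, st, q, hq => by
    rw [List.foldl_cons]
    refine pv_mem_primes_foldl s l _ q ?_
    unfold sieveStep
    split_ifs
    · exact List.mem_append_left _ hq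
    · exact hq

theorem pv_init_good (s : Int) (hs : 0 ≤ s) :
    SieveGood s (Array.replicate (s + 1).toNat false, ([] : List Int)) := by
  refine ⟨⟨Array.size_replicate, fun k hk0 hks htrue => absurd htrue ?_⟩, fun q hq => by simp at hq⟩
  rw [Array.getD_eq_getD_getElem?, Array.getElem?_replicate, if_pos (by omega)]
  simp

theorem pv_complete (s d : Int) (hs : 0 ≤ s) (hd2 : 2 ≤ d) (hds : d ≤ s)
    (hprime : ¬∃ j : Int, 2 ≤ j ∧ j < d ∧ j ∣ d) :
    d ∈ ((PySem.List.pyRange 2 (s + 1) 1).foldl (sieveStep s)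
          (Array.replicate (s + 1).toNat false, ([] : List Int))).2 := by
  rw [PySem.List.pyRange_one_append 2 d (s + 1) (by omega) (by omega), List.foldl_append,
    PySem.List.pyRange_one_cons (show d < s + 1 by omega), List.foldl_cons]
  have hg : SieveGood s ((PySem.List.pyRange 2 d 1).foldl (sieveStep s)
      (Array.replicate (s + 1).toNat false, ([] : List Int))) := by
    refine pv_foldl_good s _ _ (fun p hp => ?_) (pv_init_good s hs)
    rw [PySem.List.mem_pyRange_one] at hp; omega
  set st1 := (PySem.List.pyRange 2 d 1).foldl (sieveStep s)
      (Array.replicate (s + 1).toNat false, ([] : List Int)) with hst1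
  have hfalse : st1.1.getD d.toNat false = false := by
    cases h : st1.1.getD d.toNat false
    · rfl
    · exact absurd (hg.1.2 d (by omega) hds h) hprime
  refine pv_mem_primes_foldl s _ _ d ?_
  unfold sieveStep
  rw [if_pos hfalse]
  exact List.mem_append_right _ (List.mem_singleton.mpr rfl)

-- B's test: some sieved prime divides num ⟺ some d ∈ [2, s] divides num (for num ≥ 2;
-- the ⟸ direction goes through the least prime factor of num, which the sieve must collect).
theorem pv_primes_any (num s : Int) (hnum : 2 ≤ num) (hs : 0 ≤ s) :
    ((((PySem.List.pyRange 2 (s + 1) 1).foldl (sieveStep s)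
        (Array.replicate (s + 1).toNat false, ([] : List Int))).2.any
      (fun p => PySem.Int.mod num p == 0)) = true)
      ↔ ∃ d : Int, 2 ≤ d ∧ d ≤ s ∧ d ∣ num := by
  rw [List.any_eq_true]
  constructor
  · rintro ⟨q, hq, hdvd⟩
    have hg := pv_foldl_good s (PySem.List.pyRange 2 (s + 1) 1) _
      (fun p hp => by rw [PySem.List.mem_pyRange_one] at hp; omega) (pv_init_good s hs)
    obtain ⟨hq2, hqs⟩ := hg.2 q hq
    rw [beq_iff_eq, PySem.Int.mod_eq_zero_iff_dvd] at hdvd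
    exact ⟨q, hq2, hqs, hdvd⟩
  · rintro ⟨d, hd2, hds, hdvd⟩
    have hne : num.toNat ≠ 1 := by omega
    have hp := Nat.minFac_prime hne
    have hnumcast : ((num.toNat : Int)) = num := Int.toNat_of_nonneg (by omega)
    have hmdvd : ((Nat.minFac num.toNat : Int)) ∣ num := by
      rw [← hnumcast]
      exact_mod_cast Nat.minFac_dvd num.toNat
    have hdnat : d.toNat ∣ num.toNat := by
      have : ((d.toNat : Int)) ∣ ((num.toNat : Int)) := by
        rw [Int.toNat_of_nonneg (by omega : (0:Int) ≤ d), hnumcast]; exact hdvd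
      exact_mod_cast this
    have hmled : Nat.minFac num.toNat ≤ d.toNat := Nat.minFac_le_of_dvd (by omega) hdnat
    have hm2 : 2 ≤ ((Nat.minFac num.toNat : Int)) := by exact_mod_cast hp.two_le
    have hms : ((Nat.minFac num.toNat : Int)) ≤ s := by
      have : ((Nat.minFac num.toNat : Int)) ≤ ((d.toNat : Int)) := by exact_mod_cast hmled
      rw [Int.toNat_of_nonneg (by omega : (0:Int) ≤ d)] at this
      omega
    have hmprime : ¬∃ j : Int, 2 ≤ j ∧ j < ((Nat.minFac num.toNat : Int)) ∧
        j ∣ ((Nat.minFac num.toNat : Int)) := by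
      rintro ⟨j, hj2, hjm, hjdvd⟩
      have hjnat : j.toNat ∣ Nat.minFac num.toNat := by
        have : ((j.toNat : Int)) ∣ ((Nat.minFac num.toNat : Int)) := by
          rw [Int.toNat_of_nonneg (by omega : (0:Int) ≤ j)]; exact hjdvd
        exact_mod_cast this
      rcases (Nat.Prime.eq_one_or_self_of_dvd hp _ hjnat) with h | h <;> omega
    refine ⟨((Nat.minFac num.toNat : Int)), pv_complete s _ hs hm2 hms hmprime, ?_⟩
    rw [beq_iff_eq, PySem.Int.mod_eq_zero_iff_dvd]
    exact hmdvd

-- A's odd-candidate test over [3, s] ⟺ some d ∈ [2, s] divides num, when num is odd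
-- (an even candidate cannot divide an odd number).
theorem pv_a_any (num s : Int) (hodd : ¬ (2:Int) ∣ num) :
    (((PySem.List.pyRange 3 (s + 1) 2).any fun i => PySem.Int.mod num i == 0) = true)
      ↔ ∃ d : Int, 2 ≤ d ∧ d ≤ s ∧ d ∣ num := by
  rw [List.any_eq_true]
  simp only [PySem.List.mem_pyRange_iff_of_pos (by norm_num : (0:Int) < 2), beq_iff_eq,
    PySem.Int.mod_eq_zero_iff_dvd]
  constructor
  · rintro ⟨i, ⟨h3, hlt, _⟩, hdvd⟩
    exact ⟨i, by omega, by omega, hdvd⟩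
  · rintro ⟨d, hd2, hds, hdvd⟩
    have hdodd : ¬ (2:Int) ∣ d := fun h => hodd (dvd_trans h hdvd)
    exact ⟨d, ⟨by omega, by omega, by omega⟩, hdvd⟩

-- ===== VERDICT (by name: the statement is the Claim_ definition above) =====
theorem classify_number_spec : Claim_equal_classify_number := by
  intro num _
  unfold Spec_classify_number classify_number classify_number_alt
  by_cases h1 : num ≤ 1
  · simp [h1]
  have h2n : 2 ≤ num := by omega
  have hs1 : 1 ≤ Int.ofNat (Nat.sqrt num.toNat) := by
    simpa using Int.ofNat_le.mpr (Nat.le_sqrt.mpr (show 1 * 1 ≤ num.toNat by omega))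
  rw [if_neg h1, if_neg h1]
  dsimp only
  by_cases hE : ∃ d : Int, 2 ≤ d ∧ d ≤ Int.ofNat (Nat.sqrt num.toNat) ∧ d ∣ num
  · -- both return "Composite"
    have hB := (pv_primes_any num (Int.ofNat (Nat.sqrt num.toNat)) h2n (by omega)).mpr hE
    rw [hB, if_pos rfl]
    obtain ⟨d, hd2, hds, hdvd⟩ := hE
    have h2ne : num ≠ 2 := by
      rintro rfl
      have ha : 1 ≤ Nat.sqrt (Int.toNat 2) := Nat.le_sqrt.mpr (by norm_num)
      have hb : Nat.sqrt (Int.toNat 2) < 2 := Nat.sqrt_lt.mpr (by norm_num)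
      have hsq : Nat.sqrt (Int.toNat 2) = 1 := by omega
      rw [hsq] at hds
      simp at hds
      omega
    rw [if_neg h2ne]
    by_cases heven : PySem.Int.mod num 2 = 0
    · rw [if_pos heven]
    · rw [if_neg heven]
      have hodd : ¬ (2:Int) ∣ num :=
        fun h => heven ((PySem.Int.mod_eq_zero_iff_dvd num 2).mpr h)
      rw [(pv_a_any num (Int.ofNat (Nat.sqrt num.toNat)) hodd).mpr ⟨d, hd2, hds, hdvd⟩, if_pos rfl]
  · -- both return "Prime"
    have hB : (((PySem.List.pyRange 2 (Int.ofNat (Nat.sqrt num.toNat) + 1) 1).foldl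
        (sieveStep (Int.ofNat (Nat.sqrt num.toNat)))
        (Array.replicate (Int.ofNat (Nat.sqrt num.toNat) + 1).toNat false, ([] : List Int))).2.any
          (fun p => PySem.Int.mod num p == 0)) = false := by
      rw [Bool.eq_false_iff]
      intro h
      exact absurd ((pv_primes_any num (Int.ofNat (Nat.sqrt num.toNat)) h2n (by omega)).mp h) hE
    rw [hB]
    simp only [Bool.false_eq_true, if_false]
    by_cases h2ne : num = 2
    · rw [if_pos h2ne]
    rw [if_neg h2ne]
    by_cases heven : PySem.Int.mod num 2 = 0
    · exfalso
      have hdvd : (2:Int) ∣ num := (PySem.Int.mod_eq_zero_iff_dvd num 2).mp heven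
      have h4 : 4 ≤ num := by omega
      have hs2 : 2 ≤ Int.ofNat (Nat.sqrt num.toNat) := by
        simpa using Int.ofNat_le.mpr (Nat.le_sqrt.mpr (show 2 * 2 ≤ num.toNat by omega))
      exact hE ⟨2, by omega, hs2, hdvd⟩
    · rw [if_neg heven]
      have hodd : ¬ (2:Int) ∣ num :=
        fun h => heven ((PySem.Int.mod_eq_zero_iff_dvd num 2).mpr h)
      have hA : ((PySem.List.pyRange 3 (Int.ofNat (Nat.sqrt num.toNat) + 1) 2).any
          fun i => PySem.Int.mod num i == 0) = false := by
        rw [Bool.eq_false_iff]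
        intro h
        exact absurd ((pv_a_any num (Int.ofNat (Nat.sqrt num.toNat)) hodd).mp h) hE
      rw [hA]
      simp
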